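-- pv_equiv track=rewrite | github.com/prsnt558908/CodeZymSolutions | q61-replace-transaction-values/solution-2-python/Solution.py | getSumsAfterTransactions
-- ===== SOURCE A (Python) =====
-- from collections import Counter
-- from typing import List
--
-- def getSumsAfterTransactions(entries: List[int], transactions: List[List[int]]) -> List[int]:
--     """
--     Maintain:
--     - freq[v] = how many times value v currently appears in entries
--     - total_sum = current sum of entries
--
--     For each [old_v, new_v]:
--     - if old_v not present or old_v == new_v: sum unchanged
--     - else replace all occurrences in O(1) using counts:
--           total_sum += (new_v - old_v) * freq[old_v]
--           freq[new_v] += freq[old_v]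
--           delete freq[old_v]
--     """
--     freq = Counter(entries)
--     total_sum = 0
--     for x in entries:
--         total_sum += x
--
--     ans: List[int] = []
--     for old_v, new_v in transactions:
--         if old_v != new_v:
--             c = freq.get(old_v, 0)
--             if c:
--                 total_sum += (new_v - old_v) * c
--                 freq[new_v] = freq.get(new_v, 0) + c
--                 del freq[old_v]
--         ans.append(total_sum)
--
--     return ans
-- ===== SOURCE B (Python) =====
-- def getSumsAfterTransactions(entries, transactions):
--     # Brute-force working copy: replace occurrences in the list itself,
--     # keeping a running total.
--     arr = list(entries)
--     total = sum(arr)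
--     ans = []
--     for old_v, new_v in transactions:
--         if old_v != new_v:
--             for i in range(len(arr)):
--                 if arr[i] == old_v:
--                     arr[i] = new_v
--                     total += new_v - old_v
--         ans.append(total)
--     return ans
-- ===== Notes on version B (the rewrite author's own statement) =====
-- stated objective: simpler
-- what changed: B drops the Counter/frequency map entirely and instead keeps a working copy of the list, scanning it once per transaction to replace occurrences and update a running total.
import Mathlib
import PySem

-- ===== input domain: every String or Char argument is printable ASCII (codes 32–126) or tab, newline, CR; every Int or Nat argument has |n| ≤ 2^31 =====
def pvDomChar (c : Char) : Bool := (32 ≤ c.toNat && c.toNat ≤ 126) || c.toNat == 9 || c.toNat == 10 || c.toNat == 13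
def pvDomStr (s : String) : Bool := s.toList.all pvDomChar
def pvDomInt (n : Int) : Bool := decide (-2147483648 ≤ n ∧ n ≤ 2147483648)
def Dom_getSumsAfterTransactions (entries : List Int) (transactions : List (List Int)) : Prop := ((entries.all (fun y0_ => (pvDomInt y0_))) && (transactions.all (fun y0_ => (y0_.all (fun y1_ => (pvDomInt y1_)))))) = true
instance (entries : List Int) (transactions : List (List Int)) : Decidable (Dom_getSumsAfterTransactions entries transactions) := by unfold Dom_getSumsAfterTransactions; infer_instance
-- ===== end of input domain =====

-- B drops A's Counter bookkeeping and instead keeps a working copy of the list, scanning it once per transaction (simpler, not faster).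


-- ===== PORT A =====
-- the main loop of A: freq is the Counter, total the running sum, ans built head-first
def pvA_go (freq : PySem.Dict Int Int) (total : Int) : List (List Int) → List Int
  | [] => []
  | t :: ts =>
    match t with
    | [old_v, new_v] =>
      if old_v ≠ new_v then
        let c := freq.getD old_v 0
        if c ≠ 0 then
          let total' := total + (new_v - old_v) * c
          let freq' := (freq.insert new_v (freq.getD new_v 0 + c)).erase old_v
          total' :: pvA_go freq' total' ts
        else
          total :: pvA_go freq total ts
      else
        total :: pvA_go freq total ts
    | _ => []  -- unpacking 'old_v, new_v = t' raises in Python; excluded by Pre_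

def getSumsAfterTransactions (entries : List Int) (transactions : List (List Int)) : List Int :=
  pvA_go (PySem.Dict.counter entries) (entries.foldl (· + ·) 0) transactions

-- ===== PORT B =====
-- the inner scan of B: replaces each element equal to o by n, adding (n - o) per hit
def pvB_replace (o n : Int) : List Int → Int → List Int × Int
  | [], total => ([], total)
  | x :: xs, total =>
    if x = o then
      let (r, t) := pvB_replace o n xs (total + (n - o))
      (n :: r, t)
    else
      let (r, t) := pvB_replace o n xs total
      (x :: r, t)

def pvB_go (arr : List Int) (total : Int) : List (List Int) → List Int
  | [] => []
  | t :: ts =>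
    match t with
    | [old_v, new_v] =>
      if old_v ≠ new_v then
        let (arr', total') := pvB_replace old_v new_v arr total
        total' :: pvB_go arr' total' ts
      else
        total :: pvB_go arr total ts
    | _ => []  -- unpacking raises in Python; excluded by Pre_

def getSumsAfterTransactions_alt (entries : List Int) (transactions : List (List Int)) : List Int :=
  pvB_go entries entries.sum transactions

-- ===== PRECONDITION & SPEC =====
-- Pre_ excludes exactly the inputs where Python's 'old_v, new_v = t' unpacking raises ValueError (a transaction of length ≠ 2).
def Pre_getSumsAfterTransactions (entries : List Int) (transactions : List (List Int)) : Prop :=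
  ∀ t ∈ transactions, t.length = 2
instance (entries : List Int) (transactions : List (List Int)) : Decidable (Pre_getSumsAfterTransactions entries transactions) := by unfold Pre_getSumsAfterTransactions; infer_instance

def pvWitness_getSumsAfterTransactions : List Int × List (List Int) := ([1, 2, 2, 3], [[2, 5], [1, 1], [7, 0], [5, 3]])

def Spec_getSumsAfterTransactions (entries : List Int) (transactions : List (List Int)) (out : List Int) : Prop := out = getSumsAfterTransactions_alt entries transactions
instance (entries : List Int) (transactions : List (List Int)) (out : List Int) : Decidable (Spec_getSumsAfterTransactions entries transactions out) := by unfold Spec_getSumsAfterTransactions; infer_instance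

-- ===== CLAIM (what is proved, stated in full; the proofs are below) =====
def Claim_equal_getSumsAfterTransactions : Prop := ∀ (entries : List Int) (transactions : List (List Int)), Dom_getSumsAfterTransactions entries transactions → Pre_getSumsAfterTransactions entries transactions → Spec_getSumsAfterTransactions entries transactions (getSumsAfterTransactions entries transactions)

-- ===== LEMMAS AND PROOFS =====

theorem pvWitness_ok : Dom_getSumsAfterTransactions pvWitness_getSumsAfterTransactions.1 pvWitness_getSumsAfterTransactions.2 ∧ Pre_getSumsAfterTransactions pvWitness_getSumsAfterTransactions.1 pvWitness_getSumsAfterTransactions.2 := by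
  constructor
  · decide
  · unfold Pre_getSumsAfterTransactions pvWitness_getSumsAfterTransactions; decide

-- getD of erase
theorem pv_find_filter_ne (items : List (Int × Int)) (k k' : Int) :
    List.find? (fun p => p.1 == k') (items.filter (fun p => !p.1 == k)) =
      if k' = k then none else List.find? (fun p => p.1 == k') items := by
  induction items with
  | nil => simp
  | cons p rest ih =>
    by_cases hk : k' = k
    · simp only [hk] at *
      by_cases hpk : p.1 = k <;> simp [hpk, ih]
    · simp only [if_neg hk] at *
      by_cases hpk : p.1 = k
      · have hkk' : ¬ k = k' := fun h => hk h.symm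
        simp [hpk, hkk', ih]
      · by_cases hpk' : p.1 = k' <;>
          simp [hpk, hpk', hk, ih]

theorem pv_getD_erase (d : PySem.Dict Int Int) (k k' d0 : Int) :
    (d.erase k).getD k' d0 = if k' = k then d0 else d.getD k' d0 := by
  simp only [PySem.Dict.getD, PySem.Dict.get?, PySem.Dict.erase]
  rw [pv_find_filter_ne]
  split_ifs <;> simp

-- the replace scan computed in closed form
theorem pvB_replace_spec (o n : Int) (arr : List Int) (total : Int) :
    pvB_replace o n arr total =
      (arr.map (fun x => if x = o then n else x), total + (n - o) * (arr.count o : Int)) := by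
  induction arr generalizing total with
  | nil => simp [pvB_replace]
  | cons x xs ih =>
    by_cases hx : x = o
    · simp [pvB_replace, hx, ih]
      ring
    · simp [pvB_replace, hx, ih]

-- counts after replacement
theorem pv_count_map_replace (o n v : Int) (arr : List Int) (hon : o ≠ n) :
    (arr.map (fun x => if x = o then n else x)).count v =
      if v = n then arr.count n + arr.count o else if v = o then 0 else arr.count v := by
  induction arr with
  | nil => simp
  | cons x xs ih =>
    simp only [List.map_cons, List.count_cons, ih]
    split_ifs <;> simp_all <;> omega

-- main loop correspondence under the invariant 'freq counts arr'
theorem pv_go_eq (ts : List (List Int)) (freq : PySem.Dict Int Int) (arr : List Int) (total : Int)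
    (hpre : ∀ t ∈ ts, t.length = 2)
    (hinv : ∀ v, freq.getD v 0 = (arr.count v : Int)) :
    pvA_go freq total ts = pvB_go arr total ts := by
  induction ts generalizing freq arr total with
  | nil => rfl
  | cons t ts ih =>
    have ht : t.length = 2 := hpre t (by simp)
    match t, ht with
    | [o, n], _ =>
      have hpre' : ∀ t ∈ ts, t.length = 2 := fun t h => hpre t (by simp [h])
      by_cases hon : o ≠ n
      · simp only [pvA_go, pvB_go, if_pos hon]
        rw [pvB_replace_spec]
        have hc : freq.getD o 0 = (arr.count o : Int) := hinv o
        by_cases hz : freq.getD o 0 ≠ 0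
        · have hcount : (arr.count o : Int) ≠ 0 := by rw [← hc]; exact hz
          simp only [hc]
          rw [if_pos hcount]
          congr 1
          apply ih _ _ _ hpre'
          intro v
          rw [pv_getD_erase, PySem.Dict.getD_insert]
          rw [pv_count_map_replace o n v arr (by omega)]
          by_cases hvo : v = o
          · simp [hvo, hon]
          · by_cases hvn : v = n
            · simp [hvn, hinv n, Ne.symm hon]
            · simp [hvo, hvn, hinv v]
        · have hcount : (arr.count o : Int) = 0 := by rw [← hc]; simpa using hz
          have hcnat : arr.count o = 0 := by exact_mod_cast hcount
          have hno : o ∉ arr := List.count_eq_zero.mp hcnat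
          have hmap : arr.map (fun x => if x = o then n else x) = arr := by
            conv_rhs => rw [← List.map_id arr]
            apply List.map_congr_left
            intro x hx
            have hxo : ¬ x = o := fun h => hno (h ▸ hx)
            simp [hxo]
          simp only [if_neg hz, hcount, mul_zero, add_zero, hmap]
          congr 1
          exact ih _ _ _ hpre' hinv
      · simp only [pvA_go, pvB_go, if_neg hon]
        congr 1
        exact ih _ _ _ hpre' hinv

-- ===== VERDICT (by name: the statement is the Claim_ definition above) =====
theorem getSumsAfterTransactions_spec : Claim_equal_getSumsAfterTransactions := by
  intro entries transactions _ hpre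
  unfold Spec_getSumsAfterTransactions getSumsAfterTransactions getSumsAfterTransactions_alt
  have hsum : entries.foldl (· + ·) 0 = entries.sum := by
    rw [List.sum_eq_foldl]
  rw [hsum]
  exact pv_go_eq transactions _ entries entries.sum hpre (fun v => by
    simp [PySem.Dict.getD_counter])
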